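-- pv_equiv track=rewrite | github.com/XENOX-GRIX/Crawling_Covid_Statistics_and_News | worldometer/helper.py | parsehref
-- ===== SOURCE A (Python) =====
-- def parsehref(s):
--     final_string = "https://www.worldometers.info/coronavirus/"
--     count = 0
--     for i in s:
--         if i == '"':
--             if count <=2:
--                 count+=1
--                 continue
--             else:
--                 break
--         if count == 3:
--             final_string = final_string + i
--     return final_string
-- ===== SOURCE B (Python) =====
-- def parsehref(s):
--     prefix = "https://www.worldometers.info/coronavirus/"
--     parts = s.split('"')
--     if len(parts) > 3:
--         return prefix + parts[3]
--     return prefix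
-- ===== Notes on version B (the rewrite author's own statement) =====
-- stated objective: simpler
-- what changed: Replaced the per-character quote-counting loop (with continue/break and repeated string concatenation) by a single split on the quote character and one indexed lookup: the fourth piece is exactly the text after the 3rd quote up to the 4th quote or the end.
import Mathlib
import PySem

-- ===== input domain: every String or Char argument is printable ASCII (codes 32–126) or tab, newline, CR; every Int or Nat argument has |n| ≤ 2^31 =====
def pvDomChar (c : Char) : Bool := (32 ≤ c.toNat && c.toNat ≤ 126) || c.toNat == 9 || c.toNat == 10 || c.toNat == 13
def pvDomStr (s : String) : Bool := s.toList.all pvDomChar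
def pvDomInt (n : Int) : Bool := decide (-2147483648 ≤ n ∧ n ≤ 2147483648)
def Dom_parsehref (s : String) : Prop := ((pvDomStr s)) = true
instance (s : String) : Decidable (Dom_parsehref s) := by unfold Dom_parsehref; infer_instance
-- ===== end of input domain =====

-- B replaces A's per-character quote-counting loop with a single split on '"' and one indexed lookup (simpler).

-- ===== PORT A =====
-- A's for-loop with `continue`/`break`: structural recursion over the characters,
-- carrying the quote counter and the accumulated string.
def parsehrefLoop : List Char → Nat → String → String
  | [], _, acc => acc
  | c :: rest, count, acc =>
    if c == '"' then
      if count ≤ 2 then parsehrefLoop rest (count + 1) acc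
      else acc                               -- break
    else if count == 3 then parsehrefLoop rest count (acc ++ c.toString)
    else parsehrefLoop rest count acc

def parsehref (s : String) : String :=
  parsehrefLoop s.toList 0 "https://www.worldometers.info/coronavirus/"

-- ===== PORT B =====
def parsehref_alt (s : String) : String :=
  let pre := "https://www.worldometers.info/coronavirus/"
  match PySem.Str.split? s "\"" with
  | some parts => if 3 < parts.length then pre ++ (PySem.List.pyGet? parts 3).getD "" else pre
  | none => pre        -- unreachable: the separator "\"" is non-empty

-- ===== PRECONDITION & SPEC =====
def Spec_parsehref (s : String) (out : String) : Prop := out = parsehref_alt s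
instance (s : String) (out : String) : Decidable (Spec_parsehref s out) := by unfold Spec_parsehref; infer_instance

-- ===== CLAIM (what is proved, stated in full; the proofs are below) =====
def Claim_equal_parsehref : Prop := ∀ (s : String), Dom_parsehref s → Spec_parsehref s (parsehref s)

-- ===== LEMMAS AND PROOFS =====

-- `pvSel n l` : the characters A's loop appends, starting with quote counter `n`.
def pvSel : Nat → List Char → List Char
  | _, [] => []
  | n, c :: rest =>
    if c = '"' then (if n ≤ 2 then pvSel (n + 1) rest else [])
    else if n = 3 then c :: pvSel n rest else pvSel n rest

-- simple recursive single-char split (reference model for Chars.splitOn on ['"'])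
def pvParts : List Char → List Char → List (List Char)
  | pre, [] => [pre]
  | pre, c :: rest => if c = '"' then pre :: pvParts [] rest else pvParts (pre ++ [c]) rest

theorem pvLoop_eq (l : List Char) : ∀ n acc, parsehrefLoop l n acc = acc ++ String.ofList (pvSel n l) := by
  induction l with
  | nil => intro n acc; simp [parsehrefLoop, pvSel]
  | cons c rest ih =>
      intro n acc
      by_cases hq : c = '"'
      · by_cases hn : n ≤ 2 <;> simp [parsehrefLoop, pvSel, hq, hn, ih]
      · by_cases hn : n = 3 <;>
          simp [parsehrefLoop, pvSel, hq, hn, ih, String.ext_iff]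

theorem pvParts_pre (l : List Char) : ∀ pre,
    pvParts pre l = (pre ++ (pvParts [] l).headI) :: (pvParts [] l).tail := by
  induction l with
  | nil => intro pre; simp [pvParts]
  | cons c rest ih =>
      intro pre
      by_cases hq : c = '"'
      · simp [pvParts, hq]
      · simp only [pvParts, if_neg hq, List.nil_append]
        rw [ih (pre ++ [c]), ih [c]]
        simp

theorem pvSel_eq (l : List Char) : ∀ n, n ≤ 3 →
    pvSel n l = ((pvParts [] l)[3 - n]?).getD [] := by
  induction l with
  | nil =>
      intro n hn
      interval_cases n <;> simp [pvSel, pvParts]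
  | cons c rest ih =>
      intro n hn
      by_cases hq : c = '"'
      · by_cases h2 : n ≤ 2
        · have h31 : 3 - n = (3 - (n + 1)) + 1 := by omega
          simp [pvSel, pvParts, hq, h2, h31, ih (n + 1) (by omega)]
        · have h3 : n = 3 := by omega
          simp [pvSel, pvParts, hq, h3]
      · simp only [pvSel, pvParts, if_neg hq, List.nil_append]
        by_cases h3 : n = 3
        · subst h3
          rw [if_pos rfl, ih 3 (by omega), pvParts_pre rest [c], pvParts_pre rest []]
          simp
        · have h31 : 3 - n = (2 - n) + 1 := by omega
          rw [if_neg h3, ih n hn, pvParts_pre rest [c], pvParts_pre rest []]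
          simp [h31]

theorem pvGo_eq : ∀ fuel l cur acc, l.length < fuel →
    PySem.Chars.splitOn.go ['"'] fuel l cur acc = acc.reverse ++ pvParts cur.reverse l := by
  intro fuel
  induction fuel with
  | zero => intro l cur acc h; omega
  | succ fuel ih =>
      intro l cur acc h
      cases l with
      | nil => simp [PySem.Chars.splitOn.go, pvParts]
      | cons c rest =>
          by_cases hq : c = '"'
          · have hp : List.isPrefixOf ['"'] (c :: rest) = true := by simp [hq]
            rw [PySem.Chars.splitOn.go, if_pos hp,
              show List.drop (['"'].length) (c :: rest) = rest from rfl]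
            rw [ih rest [] (cur.reverse :: acc) (by simpa using Nat.lt_of_succ_lt_succ h)]
            simp [pvParts, hq]
          · have hp : List.isPrefixOf ['"'] (c :: rest) = false := by simp [List.isPrefixOf]; exact fun h => hq h.symm
            rw [PySem.Chars.splitOn.go, if_neg (by rw [hp]; decide)]
            rw [ih rest (c :: cur) acc (by simpa using Nat.lt_of_succ_lt_succ h)]
            simp [pvParts, hq]

theorem pvSplitOn_eq (l : List Char) : PySem.Chars.splitOn l ['"'] = pvParts [] l := by
  unfold PySem.Chars.splitOn
  rw [pvGo_eq (l.length + 1) l [] [] (by omega)]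
  simp

theorem pvSplit?_eq (s : String) :
    PySem.Str.split? s "\"" = some ((pvParts [] s.toList).map String.ofList) := by
  simp [PySem.Str.split?, PySem.Chars.split?, pvSplitOn_eq]

-- ===== VERDICT (by name: the statement is the Claim_ definition above) =====
theorem parsehref_spec : Claim_equal_parsehref := by
  intro s _
  unfold Spec_parsehref parsehref parsehref_alt
  rw [pvLoop_eq, pvSel_eq s.toList 0 (by omega), pvSplit?_eq]
  simp only [List.length_map]
  by_cases h : 3 < (pvParts [] s.toList).length
  · rw [if_pos h,
      show (3 : Int) = ((3 : Nat) : Int) from rfl, PySem.List.pyGet?_natCast]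
    cases hp : (pvParts [] s.toList)[3]? with
    | none => exact absurd (List.getElem?_eq_none_iff.mp hp) (by omega)
    | some v => simp [List.getElem?_map, hp]
  · rw [if_neg h]
    have hnone : (pvParts [] s.toList)[3]? = none := by
      rw [List.getElem?_eq_none_iff]; omega
    simp [hnone]
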